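-- pv_equiv track=rewrite | github.com/adammoore/maldreth-arcs | utils/data_extractor.py | extract_categories_by_stage
-- ===== SOURCE A (Python) =====
-- def extract_categories_by_stage(lifecycle_data):
--     """
--     Extract categories grouped by stage from the lifecycle data.
--
--     Args:
--         lifecycle_data (dict): The lifecycle data.
--
--     Returns:
--         dict: A dictionary mapping stage names to lists of categories.
--     """
--     categories_by_stage = {}
--
--     for exemplar in lifecycle_data["exemplars"]:
--         stage_name = exemplar["stage"]
--         category_name = exemplar["category"]
--
--         if stage_name not in categories_by_stage:
--             categories_by_stage[stage_name] = set()
--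
--         categories_by_stage[stage_name].add(category_name)
--
--     # Convert sets to sorted lists
--     for stage_name in categories_by_stage:
--         categories_by_stage[stage_name] = sorted(categories_by_stage[stage_name])
--
--     return categories_by_stage
-- ===== SOURCE B (Python) =====
-- def extract_categories_by_stage(lifecycle_data):
--     """
--     Extract categories grouped by stage from the lifecycle data.
--
--     Different decomposition: project exemplars to (stage, category) pairs once,
--     take the stages in first-occurrence order, and build each stage's sorted,
--     deduplicated category list with a per-stage comprehension.
--     """
--     pairs = [(e["stage"], e["category"]) for e in lifecycle_data["exemplars"]]
--     stages = list(dict.fromkeys(s for s, _ in pairs))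
--     return {s: sorted({c for s2, c in pairs if s2 == s}) for s in stages}
-- ===== Notes on version B (the rewrite author's own statement) =====
-- stated objective: simpler
-- what changed: Replaces A's single pass maintaining a dict of mutable per-stage sets (then a second mutating loop sorting each set) with a projection to (stage, category) pairs, an ordered dedup of the stages, and one per-stage set-comprehension + sorted, built as a single dict comprehension.
import Mathlib
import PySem

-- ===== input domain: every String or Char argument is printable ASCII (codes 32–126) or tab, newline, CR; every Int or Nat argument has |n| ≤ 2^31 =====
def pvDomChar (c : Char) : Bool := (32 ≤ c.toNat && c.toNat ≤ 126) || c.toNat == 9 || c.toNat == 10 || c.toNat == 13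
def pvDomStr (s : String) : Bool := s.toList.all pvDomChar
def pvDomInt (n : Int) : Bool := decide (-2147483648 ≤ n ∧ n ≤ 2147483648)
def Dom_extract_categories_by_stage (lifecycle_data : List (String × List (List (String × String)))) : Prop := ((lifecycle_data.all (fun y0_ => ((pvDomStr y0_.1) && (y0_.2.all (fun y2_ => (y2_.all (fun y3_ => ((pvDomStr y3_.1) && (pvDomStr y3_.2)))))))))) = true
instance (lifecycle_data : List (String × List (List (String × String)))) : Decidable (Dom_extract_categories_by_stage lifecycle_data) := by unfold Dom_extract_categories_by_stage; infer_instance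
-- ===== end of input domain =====

-- B replaces A's dict-of-mutable-sets pass (plus a second mutating sort loop) by a (stage, category)
-- pairs projection, an ordered dedup of the stages and one per-stage comprehension (objective: simpler).

-- ===== PORT A =====
-- Python d[k] raises KeyError on a missing key; Pre_ below admits exactly the inputs where every
-- such lookup succeeds, so the ports' .getD defaults are never reached inside Pre_.
def extract_categories_by_stage (lifecycle_data : List (String × List (List (String × String)))) : List (String × List String) :=
  -- categories_by_stage = {}; for exemplar in lifecycle_data["exemplars"]: …
  let exemplars := (List.lookup "exemplars" lifecycle_data).getD []
  let categories_by_stage :=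
    exemplars.foldl (fun d exemplar =>
      let stage_name := (List.lookup "stage" exemplar).getD ""
      let category_name := (List.lookup "category" exemplar).getD ""
      let d := if d.contains stage_name then d else d.insert stage_name (PySem.Set.empty)
      d.insert stage_name (PySem.Set.add (d.getD stage_name PySem.Set.empty) category_name))
      (PySem.Dict.empty : PySem.Dict String (PySem.Set String))
  -- for stage_name in categories_by_stage: categories_by_stage[stage_name] = sorted(…)
  categories_by_stage.items.map (fun kv => (kv.1, PySem.List.sorted kv.2 (fun x => x) false))

-- ===== PORT B =====
def extract_categories_by_stage_alt (lifecycle_data : List (String × List (List (String × String)))) : List (String × List String) :=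
  let pairs := ((List.lookup "exemplars" lifecycle_data).getD []).map (fun e =>
      ((List.lookup "stage" e).getD "", (List.lookup "category" e).getD ""))
  let stages := PySem.List.dedup (pairs.map (·.1))
  stages.map (fun s =>
    (s, PySem.List.sorted (PySem.Set.ofList ((pairs.filter (fun p => p.1 == s)).map (·.2))) (fun x => x) false))

-- ===== PRECONDITION & SPEC =====
-- Pre_ excludes exactly the inputs where Python A raises KeyError: a missing "exemplars" key,
-- or an exemplar dict missing "stage" or "category".
def Pre_extract_categories_by_stage (lifecycle_data : List (String × List (List (String × String)))) : Prop :=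
  (List.lookup "exemplars" lifecycle_data).isSome ∧
  ∀ e ∈ (List.lookup "exemplars" lifecycle_data).getD [],
    (List.lookup "stage" e).isSome ∧ (List.lookup "category" e).isSome
instance (lifecycle_data : List (String × List (List (String × String)))) : Decidable (Pre_extract_categories_by_stage lifecycle_data) := by unfold Pre_extract_categories_by_stage; infer_instance

def pvWitness_extract_categories_by_stage : (List (String × List (List (String × String)))) :=
  [("exemplars", [[("stage", "a"), ("category", "y")], [("stage", "a"), ("category", "x")]])]

def Spec_extract_categories_by_stage (lifecycle_data : List (String × List (List (String × String)))) (out : List (String × List String)) : Prop := out = extract_categories_by_stage_alt lifecycle_data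
instance (lifecycle_data : List (String × List (List (String × String)))) (out : List (String × List String)) : Decidable (Spec_extract_categories_by_stage lifecycle_data out) := by unfold Spec_extract_categories_by_stage; infer_instance

-- ===== CLAIM (what is proved, stated in full; the proofs are below) =====
def Claim_equal_extract_categories_by_stage : Prop := ∀ (lifecycle_data : List (String × List (List (String × String)))), Dom_extract_categories_by_stage lifecycle_data → Pre_extract_categories_by_stage lifecycle_data → Spec_extract_categories_by_stage lifecycle_data (extract_categories_by_stage lifecycle_data)

-- ===== LEMMAS AND PROOFS =====

-- A's loop body, on an already-projected (stage, category) pair.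
def pvStep (d : PySem.Dict String (PySem.Set String)) (p : String × String) : PySem.Dict String (PySem.Set String) :=
  let d := if d.contains p.1 then d else d.insert p.1 (PySem.Set.empty)
  d.insert p.1 (PySem.Set.add (d.getD p.1 PySem.Set.empty) p.2)

-- B's projection of the exemplar list to (stage, category) pairs.
def pvPairs (lifecycle_data : List (String × List (List (String × String)))) : List (String × String) :=
  ((List.lookup "exemplars" lifecycle_data).getD []).map (fun e =>
      ((List.lookup "stage" e).getD "", (List.lookup "category" e).getD ""))

theorem pvPortA_eq (lifecycle_data : List (String × List (List (String × String)))) :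
    extract_categories_by_stage lifecycle_data =
      ((pvPairs lifecycle_data).foldl pvStep PySem.Dict.empty).items.map
        (fun kv => (kv.1, PySem.List.sorted kv.2 (fun x => x) false)) := by
  simp only [extract_categories_by_stage, pvPairs, pvStep, List.foldl_map]

theorem pvPortB_eq (lifecycle_data : List (String × List (List (String × String)))) :
    extract_categories_by_stage_alt lifecycle_data =
      (PySem.List.dedup ((pvPairs lifecycle_data).map (·.1))).map
        (fun s => (s, PySem.List.sorted
          (PySem.Set.ofList (((pvPairs lifecycle_data).filter (fun p => p.1 == s)).map (·.2)))
          (fun x => x) false)) := rfl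

theorem pvStep_keys (d : PySem.Dict String (PySem.Set String)) (p : String × String) :
    (pvStep d p).keys = PySem.Set.add d.keys p.1 := by
  unfold pvStep
  by_cases h : d.contains p.1
  · simp only [h, if_true]
    rw [PySem.Dict.keys_insert_of_contains _ _ h,
        PySem.Set.add_of_mem ((PySem.Dict.contains_iff_mem_keys _ _).mp h)]
  · simp only [h, Bool.false_eq_true, if_false]
    rw [PySem.Dict.keys_insert_of_contains _ _ (PySem.Dict.contains_insert_self _ _ _),
        PySem.Dict.keys_insert_of_not_contains _ _ (by simpa using h),
        PySem.Set.add_of_not_mem (fun hm => h ((PySem.Dict.contains_iff_mem_keys _ _).mpr hm))]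

theorem pvStep_getD (d : PySem.Dict String (PySem.Set String)) (p : String × String) (s : String) :
    (pvStep d p).getD s PySem.Set.empty =
      if s = p.1 then PySem.Set.add (d.getD p.1 PySem.Set.empty) p.2 else d.getD s PySem.Set.empty := by
  unfold pvStep
  by_cases h : d.contains p.1
  · simp only [h, if_true, PySem.Dict.getD_insert]
  · have hd : d.getD p.1 PySem.Set.empty = PySem.Set.empty :=
      PySem.Dict.getD_of_not_contains _ _ (by simpa using h)
    simp only [h, Bool.false_eq_true, if_false, PySem.Dict.getD_insert]
    split_ifs with hs
    · rw [hd]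
    · rfl

theorem pvLoop_keys (ps : List (String × String)) (d : PySem.Dict String (PySem.Set String)) :
    (ps.foldl pvStep d).keys = PySem.Set.update d.keys (ps.map (·.1)) := by
  induction ps generalizing d with
  | nil => simp [PySem.Set.update]
  | cons p ps ih =>
      simp only [List.foldl_cons, List.map_cons, ih, pvStep_keys, PySem.Set.update_cons]

theorem pvLoop_getD (ps : List (String × String)) (d : PySem.Dict String (PySem.Set String)) (s : String) :
    (ps.foldl pvStep d).getD s PySem.Set.empty =
      PySem.Set.update (d.getD s PySem.Set.empty) ((ps.filter (fun p => p.1 == s)).map (·.2)) := by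
  induction ps generalizing d with
  | nil => simp [PySem.Set.update]
  | cons p ps ih =>
      simp only [List.foldl_cons, ih, pvStep_getD]
      by_cases h : p.1 = s
      · subst h
        simp [PySem.Set.update_cons]
      · have h' : s ≠ p.1 := fun hh => h hh.symm
        simp [h, h', beq_iff_eq]

-- ===== VERDICT (by name: the statement is the Claim_ definition above) =====
theorem extract_categories_by_stage_spec : Claim_equal_extract_categories_by_stage := by
  intro ld _ _
  unfold Spec_extract_categories_by_stage
  rw [pvPortA_eq, pvPortB_eq]
  set ps := pvPairs ld with hps
  set Ad := ps.foldl pvStep PySem.Dict.empty with hAd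
  have hkeys : Ad.keys = PySem.List.dedup (ps.map (·.1)) := by
    rw [hAd, pvLoop_keys, PySem.Dict.keys_empty, PySem.Set.update_nil_left,
        PySem.List.dedup_eq_ofList]
  have hnodup : Ad.keys.Nodup := by rw [hkeys]; exact PySem.List.nodup_dedup _
  have hval : ∀ kv ∈ Ad.items,
      kv.2 = PySem.Set.ofList ((ps.filter (fun p => p.1 == kv.1)).map (·.2)) := by
    rintro ⟨k, v⟩ hm
    have h1 : Ad.getD k PySem.Set.empty = v :=
      PySem.Dict.getD_of_mem_items _ hm hnodup _
    have h2 : Ad.getD k PySem.Set.empty =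
        PySem.Set.ofList ((ps.filter (fun p => p.1 == k)).map (·.2)) := by
      rw [hAd, pvLoop_getD, PySem.Dict.getD_empty]; rfl
    simpa using h1.symm.trans h2
  calc Ad.items.map (fun kv => (kv.1, PySem.List.sorted kv.2 (fun x => x) false))
      = Ad.items.map (fun kv => (kv.1, PySem.List.sorted
          (PySem.Set.ofList ((ps.filter (fun p => p.1 == kv.1)).map (·.2))) (fun x => x) false)) :=
        List.map_congr_left (fun kv hm => by rw [← hval kv hm])
    _ = Ad.keys.map (fun s => (s, PySem.List.sorted
          (PySem.Set.ofList ((ps.filter (fun p => p.1 == s)).map (·.2))) (fun x => x) false)) := by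
        simp only [PySem.Dict.keys, List.map_map]; rfl
    _ = (PySem.List.dedup (ps.map (·.1))).map (fun s => (s, PySem.List.sorted
          (PySem.Set.ofList ((ps.filter (fun p => p.1 == s)).map (·.2))) (fun x => x) false)) := by
        rw [hkeys]
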